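-- pv_equiv track=rewrite | github.com/KaraMartin/AdventOfCode2024 | 06.py | get_obstacles_and_start
-- ===== SOURCE A (Python) =====
-- from collections import defaultdict
-- from bisect import insort
--
-- def get_obstacles_and_start(inp):
--     obstacles_by_x = defaultdict(list)
--     obstacles_by_y = defaultdict(list)
--     start = None
--     for i,row in enumerate(inp):
--         for j, c in enumerate(row):
--             if c == "#":
--                 # so for first obstacle at grid[0][4]
--                 # we have obstacles_by_x[0] = [4]
--                 # and obstacles_by_y[4] = [0]
--                 insort(obstacles_by_y[i], j)
--                 insort(obstacles_by_x[j], i)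
--             elif c == "^":
--                 start = (i,j)
--     return obstacles_by_x, obstacles_by_y, start
-- ===== SOURCE B (Python) =====
-- from collections import defaultdict
--
-- def get_obstacles_and_start(inp):
--     # One pass: collect all '#' coordinates (row-major) and the start.
--     coords = []
--     start = None
--     for i, row in enumerate(inp):
--         for j, c in enumerate(row):
--             if c == "#":
--                 coords.append((i, j))
--             elif c == "^":
--                 start = (i, j)
--     # Group afterwards: row-major order means each per-key list is built
--     # already sorted, so plain appends replace the insorts.
--     obstacles_by_y = defaultdict(list)
--     for i, j in coords:
--         obstacles_by_y[i].append(j)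
--     obstacles_by_x = defaultdict(list)
--     for i, j in coords:
--         obstacles_by_x[j].append(i)
--     return obstacles_by_x, obstacles_by_y, start
-- ===== Notes on version B (the rewrite author's own statement) =====
-- stated objective: simpler
-- what changed: Instead of interleaving two bisect.insort insertions into defaultdicts during the nested grid scan, B collects all '#' coordinates (and the start) in one pass and then groups them by row and by column with plain list appends, relying on the row-major scan order keeping every per-key list already sorted.
import Mathlib
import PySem

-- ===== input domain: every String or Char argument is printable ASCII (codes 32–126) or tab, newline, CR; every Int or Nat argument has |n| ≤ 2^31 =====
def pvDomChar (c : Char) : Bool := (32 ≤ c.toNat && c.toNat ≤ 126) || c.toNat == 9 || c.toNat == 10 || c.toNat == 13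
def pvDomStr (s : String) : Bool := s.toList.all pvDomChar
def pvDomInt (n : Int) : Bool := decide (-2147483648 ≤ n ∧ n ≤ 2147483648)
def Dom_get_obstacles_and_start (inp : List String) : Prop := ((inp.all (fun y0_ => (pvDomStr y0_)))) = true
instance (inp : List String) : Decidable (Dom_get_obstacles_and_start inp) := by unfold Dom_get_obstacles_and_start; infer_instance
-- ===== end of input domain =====

-- B replaces the interleaved insort-into-defaultdict scan by collect-all-coordinates
-- then group-by-row and group-by-column with plain appends (row-major order keeps each
-- per-key list sorted); objective: simpler, no asymptotic change claimed.

-- ===== PORT A =====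
-- bisect.insort on a list of ints (insert after equal elements)
def pvInsort (xs : List Int) (v : Int) : List Int :=
  match xs with
  | [] => [v]
  | x :: rest => if v < x then v :: x :: rest else x :: pvInsort rest v

def get_obstacles_and_start (inp : List String) : (List (Int × List Int)) × (List (Int × List Int)) × (Option (Int × Int)) :=
  let r := (PySem.List.enumerate inp 0).foldl
    (fun (s : PySem.Dict Int (List Int) × PySem.Dict Int (List Int) × Option (Int × Int)) p =>
      (PySem.List.enumerate p.2.toList 0).foldl
        (fun s q =>
          if q.2 = '#' then
            (s.1.insert q.1 (pvInsort (s.1.getD q.1 []) p.1),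
             s.2.1.insert p.1 (pvInsort (s.2.1.getD p.1 []) q.1),
             s.2.2)
          else if q.2 = '^' then (s.1, s.2.1, some (p.1, q.1))
          else s) s)
    (PySem.Dict.empty, PySem.Dict.empty, none)
  (r.1.items, r.2.1.items, r.2.2)

-- ===== PORT B =====
def get_obstacles_and_start_alt (inp : List String) : (List (Int × List Int)) × (List (Int × List Int)) × (Option (Int × Int)) :=
  let cs := (PySem.List.enumerate inp 0).foldl
    (fun (s : List (Int × Int) × Option (Int × Int)) p =>
      (PySem.List.enumerate p.2.toList 0).foldl
        (fun s q =>
          if q.2 = '#' then (s.1 ++ [(p.1, q.1)], s.2)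
          else if q.2 = '^' then (s.1, some (p.1, q.1))
          else s) s)
    ([], none)
  let by_y := cs.1.foldl (fun d p => d.insert p.1 (d.getD p.1 [] ++ [p.2])) PySem.Dict.empty
  let by_x := cs.1.foldl (fun d p => d.insert p.2 (d.getD p.2 [] ++ [p.1])) PySem.Dict.empty
  (by_x.items, by_y.items, cs.2)

-- ===== PRECONDITION & SPEC =====
def Spec_get_obstacles_and_start (inp : List String) (out : (List (Int × List Int)) × (List (Int × List Int)) × (Option (Int × Int))) : Prop := out = get_obstacles_and_start_alt inp
instance (inp : List String) (out : (List (Int × List Int)) × (List (Int × List Int)) × (Option (Int × Int))) : Decidable (Spec_get_obstacles_and_start inp out) := by unfold Spec_get_obstacles_and_start; infer_instance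

-- ===== CLAIM (what is proved, stated in full; the proofs are below) =====
def Claim_equal_get_obstacles_and_start : Prop := ∀ (inp : List String), Dom_get_obstacles_and_start inp → Spec_get_obstacles_and_start inp (get_obstacles_and_start inp)

-- ===== LEMMAS AND PROOFS =====

-- the grid flattened to (row, col, char) cells in row-major order, rows numbered from i
def pvCells (i : Int) (rows : List String) : List (Int × Int × Char) :=
  match rows with
  | [] => []
  | r :: rs => (PySem.List.enumerate r.toList 0).map (fun q => (i, q.1, q.2)) ++ pvCells (i + 1) rs

def pvStepA (s : PySem.Dict Int (List Int) × PySem.Dict Int (List Int) × Option (Int × Int))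
    (t : Int × Int × Char) : PySem.Dict Int (List Int) × PySem.Dict Int (List Int) × Option (Int × Int) :=
  if t.2.2 = '#' then
    (s.1.insert t.2.1 (pvInsort (s.1.getD t.2.1 []) t.1),
     s.2.1.insert t.1 (pvInsort (s.2.1.getD t.1 []) t.2.1),
     s.2.2)
  else if t.2.2 = '^' then (s.1, s.2.1, some (t.1, t.2.1))
  else s

def pvStepB (s : List (Int × Int) × Option (Int × Int)) (t : Int × Int × Char) :
    List (Int × Int) × Option (Int × Int) :=
  if t.2.2 = '#' then (s.1 ++ [(t.1, t.2.1)], s.2)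
  else if t.2.2 = '^' then (s.1, some (t.1, t.2.1))
  else s

def pvStepS (s : Option (Int × Int)) (t : Int × Int × Char) : Option (Int × Int) :=
  if t.2.2 = '^' then some (t.1, t.2.1) else s

def pvStepX (d : PySem.Dict Int (List Int)) (p : Int × Int) : PySem.Dict Int (List Int) :=
  d.insert p.2 (d.getD p.2 [] ++ [p.1])

def pvStepY (d : PySem.Dict Int (List Int)) (p : Int × Int) : PySem.Dict Int (List Int) :=
  d.insert p.1 (d.getD p.1 [] ++ [p.2])

def pvHash (cells : List (Int × Int × Char)) : List (Int × Int) :=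
  (cells.filter (fun t => t.2.2 == '#')).map (fun t => (t.1, t.2.1))

def pvLex (p q : Int × Int × Char) : Prop := p.1 < q.1 ∨ (p.1 = q.1 ∧ p.2.1 < q.2.1)

lemma pvInsort_append (xs : List Int) (v : Int) (h : ∀ x ∈ xs, ¬ v < x) :
    pvInsort xs v = xs ++ [v] := by
  induction xs with
  | nil => rfl
  | cons x rest ih =>
    simp only [pvInsort]
    rw [if_neg (h x (by simp)), ih (fun y hy => h y (by simp [hy]))]
    rfl

-- the nested enumerate-foldl is a fold over the flattened cell list
lemma pvNested {σ : Type} (f : σ → Int × Int × Char → σ) (rows : List String) (i : Int) (s : σ) :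
    (PySem.List.enumerate rows i).foldl
      (fun s p => (PySem.List.enumerate p.2.toList 0).foldl (fun s q => f s (p.1, q.1, q.2)) s) s
    = (pvCells i rows).foldl f s := by
  induction rows generalizing i s with
  | nil => rfl
  | cons r rs ih =>
    rw [PySem.List.enumerate_cons]
    simp only [List.foldl_cons, pvCells, List.foldl_append, List.foldl_map]
    exact ih (i + 1) _

lemma pvCells_lb (rows : List String) (i : Int) : ∀ p ∈ pvCells i rows, i ≤ p.1 := by
  induction rows generalizing i with
  | nil => intro p hp; simp [pvCells] at hp
  | cons r rs ih =>
    intro p hp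
    simp only [pvCells, List.mem_append, List.mem_map] at hp
    rcases hp with ⟨q, _, rfl⟩ | hp
    · exact le_refl i
    · have := ih (i + 1) p hp; omega

lemma pvCells_pairwise (rows : List String) (i : Int) : (pvCells i rows).Pairwise pvLex := by
  induction rows generalizing i with
  | nil => simp [pvCells]
  | cons r rs ih =>
    simp only [pvCells]
    refine List.pairwise_append.mpr ⟨?_, ih (i + 1), ?_⟩
    · refine List.Pairwise.map _ ?_ (PySem.List.pairwise_lt_enumerate r.toList 0)
      intro a b hab
      exact Or.inr ⟨rfl, hab⟩
    · intro p hp q hq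
      rcases List.mem_map.mp hp with ⟨a, _, rfl⟩
      have := pvCells_lb rs (i + 1) q hq
      exact Or.inl (by omega)

-- B's collect loop, reduced: coordinates are the '#' cells in order, start is the last '^'
lemma pvCollect (cells : List (Int × Int × Char)) (cs : List (Int × Int)) (st : Option (Int × Int)) :
    cells.foldl pvStepB (cs, st) = (cs ++ pvHash cells, cells.foldl pvStepS st) := by
  induction cells generalizing cs st with
  | nil => simp [pvHash]
  | cons t ts ih =>
    simp only [List.foldl_cons, pvStepB, pvStepS]
    by_cases h1 : t.2.2 = '#'
    · rw [if_pos h1, if_neg (by rw [h1]; decide), ih]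
      simp [pvHash, h1]
    · by_cases h2 : t.2.2 = '^'
      · rw [if_neg h1, if_pos h2, if_pos h2, ih]
        simp [pvHash, h1]
      · rw [if_neg h1, if_neg h2, if_neg h2, ih]
        simp [pvHash, h1]

-- main invariant: A's fold over the cells splits into B's three folds
lemma pvMain (cells : List (Int × Int × Char)) (dx dy : PySem.Dict Int (List Int))
    (st : Option (Int × Int))
    (hpw : cells.Pairwise pvLex)
    (hx : ∀ p ∈ cells, p.2.2 = '#' → ∀ v ∈ dx.getD p.2.1 [], v < p.1)
    (hy : ∀ p ∈ cells, p.2.2 = '#' → ∀ v ∈ dy.getD p.1 [], v < p.2.1) :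
    cells.foldl pvStepA (dx, dy, st)
      = ((pvHash cells).foldl pvStepX dx, (pvHash cells).foldl pvStepY dy,
         cells.foldl pvStepS st) := by
  induction cells generalizing dx dy st with
  | nil => simp [pvHash]
  | cons t ts ih =>
    rcases List.pairwise_cons.mp hpw with ⟨hrel, hpw'⟩
    simp only [List.foldl_cons, pvStepA, pvStepS]
    by_cases h1 : t.2.2 = '#'
    · rw [if_pos h1, if_neg (by rw [h1]; decide)]
      have hxa : ∀ v ∈ dx.getD t.2.1 [], v < t.1 := hx t (by simp) h1
      have hya : ∀ v ∈ dy.getD t.1 [], v < t.2.1 := hy t (by simp) h1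
      rw [pvInsort_append _ _ (fun x hx' => by have := hxa x hx'; omega),
          pvInsort_append _ _ (fun x hx' => by have := hya x hx'; omega)]
      have hx' : ∀ p ∈ ts, p.2.2 = '#' →
          ∀ v ∈ (dx.insert t.2.1 (dx.getD t.2.1 [] ++ [t.1])).getD p.2.1 [], v < p.1 := by
        intro p hp hp' v hv
        rw [PySem.Dict.getD_insert] at hv
        split_ifs at hv with he
        · rcases List.mem_append.mp hv with hv | hv
          · have h2 := hxa v hv
            rcases hrel p hp with h | ⟨_, h⟩ <;> omega
          · simp at hv
            rcases hrel p hp with h | ⟨_, h⟩ <;> omega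
        · exact hx p (by simp [hp]) hp' v hv
      have hy' : ∀ p ∈ ts, p.2.2 = '#' →
          ∀ v ∈ (dy.insert t.1 (dy.getD t.1 [] ++ [t.2.1])).getD p.1 [], v < p.2.1 := by
        intro p hp hp' v hv
        rw [PySem.Dict.getD_insert] at hv
        split_ifs at hv with he
        · rcases List.mem_append.mp hv with hv | hv
          · have h2 := hya v hv
            rcases hrel p hp with h | ⟨_, h⟩ <;> omega
          · simp at hv
            rcases hrel p hp with h | ⟨_, h⟩ <;> omega
        · exact hy p (by simp [hp]) hp' v hv
      have hhash : pvHash (t :: ts) = (t.1, t.2.1) :: pvHash ts := by simp [pvHash, h1]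
      rw [hhash]
      simp only [List.foldl_cons]
      rw [ih _ _ _ hpw' hx' hy']
      rfl
    · have hhash : pvHash (t :: ts) = pvHash ts := by simp [pvHash, h1]
      have hx' : ∀ p ∈ ts, p.2.2 = '#' → ∀ v ∈ dx.getD p.2.1 [], v < p.1 :=
        fun p hp => hx p (by simp [hp])
      have hy' : ∀ p ∈ ts, p.2.2 = '#' → ∀ v ∈ dy.getD p.1 [], v < p.2.1 :=
        fun p hp => hy p (by simp [hp])
      by_cases h2 : t.2.2 = '^'
      · rw [if_neg h1, if_pos h2, if_pos h2, hhash, ih _ _ _ hpw' hx' hy']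
      · rw [if_neg h1, if_neg h2, if_neg h2, hhash, ih _ _ _ hpw' hx' hy']

-- ===== VERDICT (by name: the statement is the Claim_ definition above) =====
theorem get_obstacles_and_start_spec : Claim_equal_get_obstacles_and_start := by
  intro inp _
  unfold Spec_get_obstacles_and_start
  have hA : get_obstacles_and_start inp
      = (let r := (pvCells 0 inp).foldl pvStepA (PySem.Dict.empty, PySem.Dict.empty, none)
         (r.1.items, r.2.1.items, r.2.2)) :=
    congrArg (fun r : PySem.Dict Int (List Int) × PySem.Dict Int (List Int) × Option (Int × Int) =>
      (r.1.items, r.2.1.items, r.2.2)) (pvNested pvStepA inp 0 _)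
  have hB : get_obstacles_and_start_alt inp
      = (let cs := (pvCells 0 inp).foldl pvStepB ([], none)
         ((cs.1.foldl pvStepX PySem.Dict.empty).items,
          (cs.1.foldl pvStepY PySem.Dict.empty).items, cs.2)) :=
    congrArg (fun cs : List (Int × Int) × Option (Int × Int) =>
      ((cs.1.foldl pvStepX PySem.Dict.empty).items,
       (cs.1.foldl pvStepY PySem.Dict.empty).items, cs.2)) (pvNested pvStepB inp 0 _)
  rw [hA, hB]
  rw [pvMain (pvCells 0 inp) PySem.Dict.empty PySem.Dict.empty none
        (pvCells_pairwise inp 0)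
        (by intro p _ _ v hv; simp [PySem.Dict.getD, PySem.Dict.get?, PySem.Dict.empty] at hv)
        (by intro p _ _ v hv; simp [PySem.Dict.getD, PySem.Dict.get?, PySem.Dict.empty] at hv)]
  rw [pvCollect (pvCells 0 inp) [] none]
  rfl
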